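-- pv_equiv track=rewrite | github.com/alaney2/cs491-cap | graph traversals 2/checkposts.py | solve
-- ===== SOURCE A (Python) =====
-- def dfs(graph, v, visited, stack):
--     visited[v] = True
--     for i in graph[v]:
--         if not visited[i]:
--             dfs(graph, i, visited, stack)
--     stack = stack.append(v)
--
-- def transpose(graph, n):
--     g = [[] for _ in range(n)]
--     for i in range(n):
--         for j in graph[i]:
--             g[j].append(i)
--     return g
--
-- def fillOrder(graph, n, visited, stack):
--     for i in range(n):
--         if not visited[i]:
--             dfs(graph, i, visited, stack)
--
-- def kosaraju(graph, n):
--     stack = []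
--     visited = [False] * n
--
--     fillOrder(graph, n, visited, stack)
--
--     gr = transpose(graph, n)
--
--     visited = [False] * n
--
--     scc_costs = []
--     while stack:
--         i = stack.pop()
--         if not visited[i]:
--             scc = []
--             dfs(gr, i, visited, scc)
--             scc_costs.append(scc)
--
--     return scc_costs
--
-- def solve(n, costs, graph):
--     MOD = 1000000007
--
--     sccs = kosaraju(graph, n)
--     min_cost = 0
--     ways = 1
--
--     for scc in sccs:
--         min_scc_cost = min(costs[i] for i in scc)
--         min_cost += min_scc_cost
--         ways = (ways * sum(costs[i] == min_scc_cost for i in scc)) % MOD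
--
--     return min_cost, ways
-- ===== SOURCE B (Python) =====
-- def solve(n, costs, graph):
--     # Kosaraju order pass, but the reverse pass walks the transposed edges by
--     # scanning rows directly (no transposed graph is built) and fuses the
--     # min/count aggregation into the traversal (no SCC lists are built).
--     MOD = 1000000007
--
--     visited = [False] * n
--     order = []
--
--     def finish(v):
--         visited[v] = True
--         for w in graph[v]:
--             if not visited[w]:
--                 finish(w)
--         order.append(v)
--
--     for v in range(n):
--         if not visited[v]:
--             finish(v)
--
--     seen = [False] * n
--
--     def collect(v, m, c):
--         # accumulate (min cost, number of nodes attaining it) over the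
--         # component of v, following in-edges found by scanning all rows
--         seen[v] = True
--         cv = costs[v]
--         if cv < m:
--             m, c = cv, 1
--         elif cv == m:
--             c += 1
--         for u in range(n):
--             if not seen[u] and v in graph[u]:
--                 m, c = collect(u, m, c)
--         return m, c
--
--     total, ways = 0, 1
--     for v in reversed(order):
--         if not seen[v]:
--             m, c = collect(v, costs[v], 0)
--             total += m
--             ways = ways * c % MOD
--     return total, ways
-- ===== Notes on version B (the rewrite author's own statement) =====
-- stated objective: alternative
-- what changed: The reverse (second) Kosaraju pass no longer builds the transposed graph: it follows in-edges by scanning rows with a membership test, and the per-SCC min-cost/count aggregation is fused into that traversal as an accumulator, so neither the transposed adjacency lists nor the SCC node lists are ever materialized.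
-- outside the precondition, e.g. on solve(2, [1, 2], [[1], [-2]]): A returns (1, 1), B returns (3, 1); on solve(3, [1, 2, 3], [[0]]): A raises IndexError, B raises IndexError
import Mathlib
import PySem

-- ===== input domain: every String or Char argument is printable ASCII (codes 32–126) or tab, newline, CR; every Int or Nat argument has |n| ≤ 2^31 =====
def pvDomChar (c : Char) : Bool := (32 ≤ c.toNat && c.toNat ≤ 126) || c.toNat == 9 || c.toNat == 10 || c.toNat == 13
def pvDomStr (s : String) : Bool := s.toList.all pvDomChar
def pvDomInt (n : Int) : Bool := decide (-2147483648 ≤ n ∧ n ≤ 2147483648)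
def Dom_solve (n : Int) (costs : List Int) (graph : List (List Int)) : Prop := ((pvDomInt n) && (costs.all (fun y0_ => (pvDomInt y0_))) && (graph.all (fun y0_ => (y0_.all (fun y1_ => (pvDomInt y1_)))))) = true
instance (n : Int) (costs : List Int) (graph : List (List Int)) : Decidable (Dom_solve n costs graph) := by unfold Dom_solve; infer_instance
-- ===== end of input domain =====

-- B keeps Kosaraju's order pass but runs the reverse pass without building the
-- transposed graph (it scans rows for in-edges) and fuses the min/count
-- aggregation into that traversal; alternative structure, not claimed faster.


-- ===== PORT A =====
-- A's recursive dfs; the Nat fuel only totalizes the recursion (Python's call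
-- depth is bounded by the number of nodes, so fuel n+1 never runs out on Pre_).
mutual
def dfsA (g : List (List Int)) (fuel : Nat) (v : Int) (vis : List Bool) (st : List Int) :
    List Bool × List Int :=
  match fuel with
  | 0 => (vis, st)
  | f + 1 =>
    let p := dfsAList g f (g.getD v.toNat []) (vis.set v.toNat true) st
    (p.1, p.2 ++ [v])
  termination_by (fuel, 0)
def dfsAList (g : List (List Int)) (f : Nat) (ns : List Int) (vis : List Bool) (st : List Int) :
    List Bool × List Int :=
  match ns with
  | [] => (vis, st)
  | i :: rest =>
    let p := if vis.getD i.toNat false then (vis, st) else dfsA g f i vis st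
    dfsAList g f rest p.1 p.2
  termination_by (f, ns.length + 1)
end

def transposeA (graph : List (List Int)) (n : Nat) : List (List Int) :=
  (List.range n).foldl
    (fun g i => (graph.getD i []).foldl
      (fun g j => g.set j.toNat (g.getD j.toNat [] ++ [(i : Int)])) g)
    (List.replicate n [])

def fillOrderA (g : List (List Int)) (n : Nat) : List Bool × List Int :=
  (List.range n).foldl
    (fun p i => if p.1.getD i false then p else dfsA g (n + 1) (Int.ofNat i) p.1 p.2)
    (List.replicate n false, [])

def kosarajuA (graph : List (List Int)) (n : Nat) : List (List Int) :=
  let st := (fillOrderA graph n).2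
  let gr := transposeA graph n
  (st.reverse.foldl
    (fun (p : List Bool × List (List Int)) i =>
      if p.1.getD i.toNat false then p
      else
        let q := dfsA gr (n + 1) i p.1 []
        (q.1, p.2 ++ [q.2]))
    (List.replicate n false, [])).2

-- Python min() over the (always nonempty) per-SCC generator; [] is unreachable
def minListA (l : List Int) : Int :=
  match l with
  | [] => 0
  | x :: xs => xs.foldl min x

def solve (n : Int) (costs : List Int) (graph : List (List Int)) : Int × Int :=
  let sccs := kosarajuA graph n.toNat
  sccs.foldl
    (fun (p : Int × Int) scc =>
      let m := minListA (scc.map (fun i => costs.getD i.toNat 0))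
      let cnt := scc.foldl (fun a i => a + (if costs.getD i.toNat 0 = m then 1 else 0)) (0 : Int)
      (p.1 + m, PySem.Int.mod (p.2 * cnt) 1000000007))
    (0, 1)

-- ===== PORT B =====
-- B's order pass (same recursive finishing-order DFS as A's first pass)
mutual
def finishB (g : List (List Int)) (fuel : Nat) (v : Int) (vis : List Bool) (ord : List Int) :
    List Bool × List Int :=
  match fuel with
  | 0 => (vis, ord)
  | f + 1 =>
    let p := finishBList g f (g.getD v.toNat []) (vis.set v.toNat true) ord
    (p.1, p.2 ++ [v])
  termination_by (fuel, 0)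
def finishBList (g : List (List Int)) (f : Nat) (ns : List Int) (vis : List Bool) (ord : List Int) :
    List Bool × List Int :=
  match ns with
  | [] => (vis, ord)
  | w :: rest =>
    let p := if vis.getD w.toNat false then (vis, ord) else finishB g f w vis ord
    finishBList g f rest p.1 p.2
  termination_by (f, ns.length + 1)
end

-- B's reverse pass: accumulate (min cost, count) over the component of v,
-- finding in-edges by scanning all rows (no transposed graph is built)
mutual
def collectB (costs : List Int) (graph : List (List Int)) (n : Nat) (fuel : Nat) (v : Int)
    (vis : List Bool) (m c : Int) : List Bool × Int × Int :=
  match fuel with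
  | 0 => (vis, m, c)
  | f + 1 =>
    let vis1 := vis.set v.toNat true
    let cv := costs.getD v.toNat 0
    let mc : Int × Int := if cv < m then (cv, 1) else if cv = m then (m, c + 1) else (m, c)
    collectBList costs graph n f v (List.range n) vis1 mc.1 mc.2
  termination_by (fuel, 0)
def collectBList (costs : List Int) (graph : List (List Int)) (n : Nat) (f : Nat) (v : Int)
    (us : List Nat) (vis : List Bool) (m c : Int) : List Bool × Int × Int :=
  match us with
  | [] => (vis, m, c)
  | u :: rest =>
    let p := if !vis.getD u false && (graph.getD u []).contains v
      then collectB costs graph n f (Int.ofNat u) vis m c else (vis, m, c)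
    collectBList costs graph n f v rest p.1 p.2.1 p.2.2
  termination_by (f, us.length + 1)
end

def solve_alt (n : Int) (costs : List Int) (graph : List (List Int)) : Int × Int :=
  let nn := n.toNat
  let ord := ((List.range nn).foldl
    (fun p v => if p.1.getD v false then p else finishB graph (nn + 1) (Int.ofNat v) p.1 p.2)
    (List.replicate nn false, [])).2
  let r := ord.reverse.foldl
    (fun (p : List Bool × Int × Int) v =>
      if p.1.getD v.toNat false then p
      else
        let q := collectB costs graph nn (nn + 1) v p.1 (costs.getD v.toNat 0) 0
        (q.1, p.2.1 + q.2.1, PySem.Int.mod (p.2.2 * q.2.2) 1000000007))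
    (List.replicate nn false, 0, 1)
  (r.2.1, r.2.2)

-- ===== PRECONDITION & SPEC =====
-- Pre_ excludes inputs where A raises IndexError (n exceeding the length of
-- graph or costs) and malformed graphs with edges outside [0, n): on negative
-- edges Python's negative-index wraparound makes A return an accidental value.
def Pre_solve (n : Int) (costs : List Int) (graph : List (List Int)) : Prop :=
  n.toNat ≤ graph.length ∧ n.toNat ≤ costs.length ∧
    ∀ row ∈ graph.take n.toNat, ∀ j ∈ row, 0 ≤ j ∧ j < n

instance (n : Int) (costs : List Int) (graph : List (List Int)) : Decidable (Pre_solve n costs graph) := by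
  unfold Pre_solve; infer_instance

def pvWitness_solve : Int × List Int × List (List Int) := (3, [2, 1, 2], [[1], [2], [0]])

def Spec_solve (n : Int) (costs : List Int) (graph : List (List Int)) (out : Int × Int) : Prop := out = solve_alt n costs graph
instance (n : Int) (costs : List Int) (graph : List (List Int)) (out : Int × Int) : Decidable (Spec_solve n costs graph out) := by unfold Spec_solve; infer_instance

-- ===== CLAIM (what is proved, stated in full; the proofs are below) =====
def Claim_equal_solve : Prop := ∀ (n : Int) (costs : List Int) (graph : List (List Int)), Dom_solve n costs graph → Pre_solve n costs graph → Spec_solve n costs graph (solve n costs graph)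

-- ===== LEMMAS AND PROOFS =====


-- ── basic facts about Bool-array set/getD ──
theorem getD_set_mono (vis : List Bool) (j k : Nat) (h : vis.getD k false = true) :
    (vis.set j true).getD k false = true := by
  simp only [List.getD_eq_getElem?_getD] at *
  rcases eq_or_ne j k with rfl | hne
  · by_cases hl : j < vis.length
    · simp [List.getElem?_set_self hl]
    · rw [List.set_eq_of_length_le (Nat.le_of_not_lt hl)]; exact h
  · rw [List.getElem?_set_ne hne]; exact h

theorem getD_set_self (vis : List Bool) (j : Nat) (h : j < vis.length) :
    (vis.set j true).getD j false = true := by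
  simp [List.getD_eq_getElem?_getD, List.getElem?_set_self h]

-- ── structural facts about A's dfs ──
mutual
theorem dfsA_len (g : List (List Int)) (f : Nat) (v : Int) (vis : List Bool) (st : List Int) :
    ((dfsA g f v vis st).1).length = vis.length := by
  match f with
  | 0 => simp [dfsA]
  | f + 1 =>
    have h := dfsAList_len g f (g.getD v.toNat []) (vis.set v.toNat true) st
    simp only [dfsA]
    simpa using h
  termination_by (f, 0)
theorem dfsAList_len (g : List (List Int)) (f : Nat) (ns : List Int) (vis : List Bool) (st : List Int) :
    ((dfsAList g f ns vis st).1).length = vis.length := by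
  match ns with
  | [] => simp [dfsAList]
  | i :: rest =>
    simp only [dfsAList]
    cases hv : vis.getD i.toNat false with
    | true =>
      simpa using dfsAList_len g f rest vis st
    | false =>
      simp only [Bool.false_eq_true, if_false]
      have h1 := dfsA_len g f i vis st
      have h2 := dfsAList_len g f rest (dfsA g f i vis st).1 (dfsA g f i vis st).2
      omega
  termination_by (f, ns.length + 1)
end

mutual
theorem dfsA_mono (g : List (List Int)) (f : Nat) (v : Int) (vis : List Bool) (st : List Int)
    (k : Nat) (h : vis.getD k false = true) : ((dfsA g f v vis st).1).getD k false = true := by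
  match f with
  | 0 => simpa [dfsA] using h
  | f + 1 =>
    have h1 := getD_set_mono vis v.toNat k h
    have h2 := dfsAList_mono g f (g.getD v.toNat []) (vis.set v.toNat true) st k h1
    simp only [dfsA]
    simpa using h2
  termination_by (f, 0)
theorem dfsAList_mono (g : List (List Int)) (f : Nat) (ns : List Int) (vis : List Bool) (st : List Int)
    (k : Nat) (h : vis.getD k false = true) : ((dfsAList g f ns vis st).1).getD k false = true := by
  match ns with
  | [] => simpa [dfsAList] using h
  | i :: rest =>
    simp only [dfsAList]
    cases hv : vis.getD i.toNat false with
    | true =>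
      simpa using dfsAList_mono g f rest vis st k h
    | false =>
      simp only [Bool.false_eq_true, if_false]
      have h1 := dfsA_mono g f i vis st k h
      have h2 := dfsAList_mono g f rest (dfsA g f i vis st).1 (dfsA g f i vis st).2 k h1
      simpa using h2
  termination_by (f, ns.length + 1)
end

theorem dfsA_marks (g : List (List Int)) (f : Nat) (v : Int) (vis : List Bool) (st : List Int)
    (hl : v.toNat < vis.length) :
    ((dfsA g (f + 1) v vis st).1).getD v.toNat false = true := by
  simp only [dfsA]
  exact dfsAList_mono _ _ _ _ _ _ (getD_set_self vis v.toNat hl)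

theorem dfsAList_zero (g : List (List Int)) (ns : List Int) (vis : List Bool) (st : List Int) :
    dfsAList g 0 ns vis st = (vis, st) := by
  induction ns with
  | nil => simp [dfsAList]
  | cons i rest ih =>
    simp only [dfsAList]
    cases hv : vis.getD i.toNat false with
    | true => simpa using ih
    | false => simpa [dfsA] using ih

mutual
theorem dfsA_acc (g : List (List Int)) (f : Nat) (v : Int) (vis : List Bool) (st : List Int) :
    dfsA g f v vis st = ((dfsA g f v vis []).1, st ++ (dfsA g f v vis []).2) := by
  match f with
  | 0 => simp [dfsA]
  | f + 1 =>
    simp only [dfsA]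
    rw [dfsAList_acc g f (g.getD v.toNat []) (vis.set v.toNat true) st]
    simp
  termination_by (f, 0)
theorem dfsAList_acc (g : List (List Int)) (f : Nat) (ns : List Int) (vis : List Bool) (st : List Int) :
    dfsAList g f ns vis st = ((dfsAList g f ns vis []).1, st ++ (dfsAList g f ns vis []).2) := by
  match ns with
  | [] => simp [dfsAList]
  | i :: rest =>
    simp only [dfsAList]
    cases hv : vis.getD i.toNat false with
    | true => simpa using dfsAList_acc g f rest vis st
    | false =>
      simp only [Bool.false_eq_true, if_false]
      rw [dfsA_acc g f i vis st,
          dfsAList_acc g f rest (dfsA g f i vis []).1 (st ++ (dfsA g f i vis []).2),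
          dfsAList_acc g f rest (dfsA g f i vis []).1 ((dfsA g f i vis []).2)]
      simp [List.append_assoc]
  termination_by (f, ns.length + 1)
end


-- ── B's order pass is A's first pass ──
mutual
theorem finishB_eq (g : List (List Int)) (f : Nat) (v : Int) (vis : List Bool) (st : List Int) :
    finishB g f v vis st = dfsA g f v vis st := by
  match f with
  | 0 => simp [finishB, dfsA]
  | f + 1 =>
    simp only [finishB, dfsA]
    rw [finishBList_eq g f (g.getD v.toNat []) (vis.set v.toNat true) st]
  termination_by (f, 0)
theorem finishBList_eq (g : List (List Int)) (f : Nat) (ns : List Int) (vis : List Bool) (st : List Int) :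
    finishBList g f ns vis st = dfsAList g f ns vis st := by
  match ns with
  | [] => simp [finishBList, dfsAList]
  | i :: rest =>
    simp only [finishBList, dfsAList]
    rw [finishB_eq g f i vis st]
    exact finishBList_eq g f rest _ _
  termination_by (f, ns.length + 1)
end

-- ── the (min, count) accumulator step and its algebra ──
def mcStep (costs : List Int) (p : Int × Int) (i : Int) : Int × Int :=
  if costs.getD i.toNat 0 < p.1 then (costs.getD i.toNat 0, 1)
  else if costs.getD i.toNat 0 = p.1 then (p.1, p.2 + 1) else p

theorem mcStep_comm (costs : List Int) (p : Int × Int) (a b : Int) :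
    mcStep costs (mcStep costs p a) b = mcStep costs (mcStep costs p b) a := by
  rcases p with ⟨m, c⟩
  simp only [mcStep]
  generalize costs.getD a.toNat 0 = ca
  generalize costs.getD b.toNat 0 = cb
  split_ifs <;> (try dsimp only at *) <;> simp only [Prod.mk.injEq, and_true] <;> omega

theorem foldMC_step_swap (costs : List Int) (l : List Int) (p : Int × Int) (a : Int) :
    l.foldl (mcStep costs) (mcStep costs p a) = mcStep costs (l.foldl (mcStep costs) p) a := by
  induction l generalizing p with
  | nil => simp
  | cons x xs ih =>
    simp only [List.foldl_cons]
    rw [mcStep_comm costs p a x, ih]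

-- ── first-occurrence sublist: duplicates in an adjacency row are invisible to dfs ──
def fo (seen : List Int) : List Int → List Int
  | [] => []
  | x :: xs => if x ∈ seen then fo seen xs else x :: fo (x :: seen) xs

theorem dfsAList_fo (g : List (List Int)) (f : Nat) :
    ∀ (ns seen : List Int) (vis : List Bool) (st : List Int),
      (∀ x ∈ seen, vis.getD x.toNat false = true) →
      (∀ x ∈ ns, x.toNat < vis.length) →
      dfsAList g (f + 1) ns vis st = dfsAList g (f + 1) (fo seen ns) vis st := by
  intro ns
  induction ns with
  | nil => intro seen vis st _ _; simp [fo]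
  | cons x rest ih =>
    intro seen vis st hseen hrange
    by_cases hx : x ∈ seen
    · have hvx : vis.getD x.toNat false = true := hseen x hx
      simp only [fo, if_pos hx, dfsAList, hvx, if_true]
      exact ih seen vis st hseen (fun y hy => hrange y (List.mem_cons_of_mem _ hy))
    · simp only [fo, if_neg hx, dfsAList]
      cases hvx : vis.getD x.toNat false with
      | true =>
        simp only [if_true]
        exact ih (x :: seen) vis st
          (fun y hy => by
            cases List.mem_cons.mp hy with
            | inl h => subst h; exact hvx
            | inr h => exact hseen y h)
          (fun y hy => hrange y (List.mem_cons_of_mem _ hy))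
      | false =>
        simp only [Bool.false_eq_true, if_false]
        have hmark := dfsA_marks g f x vis st (hrange x (List.mem_cons_self))
        have hlen := dfsA_len g (f + 1) x vis st
        exact ih (x :: seen) (dfsA g (f + 1) x vis st).1 (dfsA g (f + 1) x vis st).2
          (fun y hy => by
            cases List.mem_cons.mp hy with
            | inl h => subst h; exact hmark
            | inr h => exact dfsA_mono g (f + 1) x vis st y.toNat (hseen y h))
          (fun y hy => by rw [hlen]; exact hrange y (List.mem_cons_of_mem _ hy))


-- ── generic set/getD helpers ──
theorem getD_set_eq {α : Type} (l : List α) (k : Nat) (a d : α) (h : k < l.length) :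
    (l.set k a).getD k d = a := by
  simp [List.getD_eq_getElem?_getD, List.getElem?_set_self h]

theorem getD_set_ne {α : Type} (l : List α) (j k : Nat) (a d : α) (h : j ≠ k) :
    (l.set j a).getD k d = l.getD k d := by
  simp [List.getD_eq_getElem?_getD, List.getElem?_set_ne h]

-- ── characterization of A's transpose rows ──
def rowT (graph : List (List Int)) (k : Nat) (l : List Nat) : List Int :=
  l.flatMap (fun i => ((graph.getD i []).filter (fun j => decide (j.toNat = k))).map (fun _ => (i : Int)))

def rowTv (graph : List (List Int)) (v : Int) (l : List Nat) : List Int :=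
  l.flatMap (fun i => ((graph.getD i []).filter (fun j => decide (j = v))).map (fun _ => (i : Int)))

theorem rowTv_cons (graph : List (List Int)) (v : Int) (i : Nat) (rest : List Nat) :
    rowTv graph v (i :: rest)
      = ((graph.getD i []).filter (fun j => decide (j = v))).map (fun _ => (i : Int))
          ++ rowTv graph v rest := by
  simp [rowTv]

theorem foldRow_getD (x : Int) :
    ∀ (row : List Int) (g : List (List Int)) (k : Nat), k < g.length →
      (∀ j ∈ row, j.toNat < g.length) →
      ((row.foldl (fun g j => g.set j.toNat (g.getD j.toNat [] ++ [x])) g).getD k []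
          = g.getD k [] ++ (row.filter (fun j => decide (j.toNat = k))).map (fun _ => x))
        ∧ (row.foldl (fun g j => g.set j.toNat (g.getD j.toNat [] ++ [x])) g).length = g.length := by
  intro row
  induction row with
  | nil => intro g k hk _; simp
  | cons j rest ih =>
    intro g k hk hr
    have hlen : (g.set j.toNat (g.getD j.toNat [] ++ [x])).length = g.length := List.length_set
    have hr' : ∀ j' ∈ rest, j'.toNat < (g.set j.toNat (g.getD j.toNat [] ++ [x])).length := by
      intro j' hj'; rw [hlen]; exact hr j' (List.mem_cons_of_mem _ hj')
    have := ih (g.set j.toNat (g.getD j.toNat [] ++ [x])) k (by rw [hlen]; exact hk) hr'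
    refine ⟨?_, this.2.trans hlen⟩
    simp only [List.foldl_cons]
    rw [this.1]
    by_cases hjk : j.toNat = k
    · subst hjk
      rw [getD_set_eq _ _ _ _ (hr j List.mem_cons_self)]
      simp
    · rw [getD_set_ne _ _ _ _ _ hjk]
      simp [hjk]

theorem foldRows_getD (graph : List (List Int)) :
    ∀ (l : List Nat) (g : List (List Int)) (k : Nat), k < g.length →
      (∀ i ∈ l, ∀ j ∈ graph.getD i [], j.toNat < g.length) →
      ((l.foldl (fun g i => (graph.getD i []).foldl
          (fun g j => g.set j.toNat (g.getD j.toNat [] ++ [(i : Int)])) g) g).getD k []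
        = g.getD k [] ++ rowT graph k l)
      ∧ (l.foldl (fun g i => (graph.getD i []).foldl
          (fun g j => g.set j.toNat (g.getD j.toNat [] ++ [(i : Int)])) g) g).length = g.length := by
  intro l
  induction l with
  | nil => intro g k hk _; simp [rowT]
  | cons i rest ih =>
    intro g k hk hE
    have hrow := foldRow_getD (i : Int) (graph.getD i []) g k hk
      (fun j hj => hE i List.mem_cons_self j hj)
    have hlen := hrow.2
    have := ih ((graph.getD i []).foldl
        (fun g j => g.set j.toNat (g.getD j.toNat [] ++ [(i : Int)])) g) k
      (by rw [hlen]; exact hk)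
      (fun i' hi' j hj => by rw [hlen]; exact hE i' (List.mem_cons_of_mem _ hi') j hj)
    refine ⟨?_, this.2.trans hlen⟩
    simp only [List.foldl_cons]
    rw [this.1, hrow.1]
    simp [rowT, List.flatMap_cons, List.append_assoc]

theorem transposeA_getD (graph : List (List Int)) (n k : Nat) (hk : k < n)
    (hE : ∀ i ∈ List.range n, ∀ j ∈ graph.getD i [], j.toNat < n) :
    (transposeA graph n).getD k [] = rowT graph k (List.range n) := by
  have := foldRows_getD graph (List.range n) (List.replicate n []) k
    (by simpa using hk) (by simpa using hE)
  rw [transposeA, this.1]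
  simp [List.getD_eq_getElem?_getD, hk]

theorem rowT_cons (graph : List (List Int)) (k : Nat) (i : Nat) (rest : List Nat) :
    rowT graph k (i :: rest)
      = ((graph.getD i []).filter (fun j => decide (j.toNat = k))).map (fun _ => (i : Int))
          ++ rowT graph k rest := by
  simp [rowT]

theorem filter_toNat_eq (v : Int) (hv : 0 ≤ v) :
    ∀ (row : List Int), (∀ j ∈ row, 0 ≤ j) →
      row.filter (fun j => decide (j.toNat = v.toNat)) = row.filter (fun j => decide (j = v)) := by
  intro row
  induction row with
  | nil => intro _; rfl
  | cons j rest ihr =>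
    intro hrow
    have h0 : 0 ≤ j := hrow j List.mem_cons_self
    have heq : (decide (j.toNat = v.toNat)) = (decide (j = v)) := by
      by_cases h : j = v
      · subst h; simp
      · have : ¬ (j.toNat = v.toNat) := by omega
        simp [h, this]
    simp only [List.filter_cons, heq]
    rw [ihr (fun y hy => hrow y (List.mem_cons_of_mem _ hy))]

theorem rowT_eq_rowTv (graph : List (List Int)) (v : Int) (hv : 0 ≤ v) :
    ∀ (l : List Nat), (∀ i ∈ l, ∀ j ∈ graph.getD i [], 0 ≤ j) →
      rowT graph v.toNat l = rowTv graph v l := by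
  intro l
  induction l with
  | nil => intro _; rfl
  | cons i rest ih =>
    intro hE
    rw [rowT_cons, rowTv_cons, filter_toNat_eq v hv _ (hE i List.mem_cons_self),
        ih (fun i' hi' => hE i' (List.mem_cons_of_mem _ hi'))]

-- ── first occurrences of a transposed row are B's filtered row scan ──
theorem fo_append_mem (seen : List Int) :
    ∀ (xs rest : List Int), (∀ x ∈ xs, x ∈ seen) → fo seen (xs ++ rest) = fo seen rest := by
  intro xs
  induction xs with
  | nil => intro rest _; simp
  | cons x xs ih =>
    intro rest h
    simp only [List.cons_append, fo, if_pos (h x List.mem_cons_self)]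
    exact ih rest (fun y hy => h y (List.mem_cons_of_mem _ hy))

theorem fo_rowTv (graph : List (List Int)) (v : Int) :
    ∀ (l : List Nat) (seen : List Int), l.Nodup → (∀ i ∈ l, (i : Int) ∉ seen) →
      fo seen (rowTv graph v l)
        = (l.filter (fun u => (graph.getD u []).contains v)).map (fun u => Int.ofNat u) := by
  intro l
  induction l with
  | nil => intro seen _ _; rfl
  | cons i rest ih =>
    intro seen hnd hns
    have hndr : rest.Nodup := (List.nodup_cons.mp hnd).2
    have hir : i ∉ rest := (List.nodup_cons.mp hnd).1
    rw [rowTv_cons]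
    cases hc : (graph.getD i []).contains v with
    | false =>
      have hvnot : v ∉ graph.getD i [] := fun hm => by
        rw [← List.contains_iff_mem] at hm; rw [hm] at hc; cases hc
      have hfil : (graph.getD i []).filter (fun j => decide (j = v)) = [] := by
        rw [List.filter_eq_nil_iff]
        intro j hj
        simp only [decide_eq_true_eq]
        intro hjv; exact hvnot (hjv ▸ hj)
      rw [hfil, List.map_nil, List.nil_append,
          ih seen hndr (fun u hu => hns u (List.mem_cons_of_mem _ hu)),
          List.filter_cons_of_neg (p := fun u => (graph.getD u []).contains v) (a := i)
            (l := rest) (by simp only [hc]; exact Bool.false_ne_true)]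
    | true =>
      have hvmem : v ∈ (graph.getD i []).filter (fun j => decide (j = v)) :=
        List.mem_filter.mpr ⟨List.contains_iff_mem.mp hc, by simp⟩
      rcases hblk : (graph.getD i []).filter (fun j => decide (j = v)) with _ | ⟨j0, js⟩
      · rw [hblk] at hvmem; cases hvmem
      · rw [List.map_cons, List.cons_append,
            List.filter_cons_of_pos (p := fun u => (graph.getD u []).contains v) (a := i)
              (l := rest) hc, List.map_cons]
        simp only [fo, if_neg (hns i List.mem_cons_self)]
        congr 1
        rw [fo_append_mem _ _ _ (fun x hx => by
            rcases List.mem_map.mp hx with ⟨y, _, rfl⟩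
            exact List.mem_cons_self),
          ih ((i : Int) :: seen) hndr (fun u hu hmem => by
            rcases List.mem_cons.mp hmem with heq | hmem'
            · exact hir (by
                have hui : u = i := by omega
                rwa [hui] at hu)
            · exact hns u (List.mem_cons_of_mem _ hu) hmem')]

-- ── B's row-scanning loop, reduced to its kept entries ──
def bloop (costs : List Int) (graph : List (List Int)) (n : Nat) (f : Nat) :
    List Nat → List Bool → Int → Int → List Bool × Int × Int
  | [], vis, m, c => (vis, m, c)
  | u :: rest, vis, m, c =>
    let p := if vis.getD u false then (vis, m, c) else collectB costs graph n f (Int.ofNat u) vis m c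
    bloop costs graph n f rest p.1 p.2.1 p.2.2

theorem collectBList_eq_bloop (costs : List Int) (graph : List (List Int)) (n f : Nat) (v : Int) :
    ∀ (us : List Nat) (vis : List Bool) (m c : Int),
      collectBList costs graph n f v us vis m c
        = bloop costs graph n f (us.filter (fun u => (graph.getD u []).contains v)) vis m c := by
  intro us
  induction us with
  | nil => intro vis m c; simp [collectBList, bloop]
  | cons u rest ih =>
    intro vis m c
    simp only [collectBList]
    cases hc : (graph.getD u []).contains v with
    | false =>
      rw [List.filter_cons_of_neg (p := fun u => (graph.getD u []).contains v) (a := u)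
            (l := rest) (by simp only [hc]; exact Bool.false_ne_true)]
      simp only [Bool.and_false, Bool.false_eq_true, if_false]
      exact ih vis m c
    | true =>
      rw [List.filter_cons_of_pos (p := fun u => (graph.getD u []).contains v) (a := u)
            (l := rest) hc]
      simp only [Bool.and_true, bloop]
      cases hv : vis.getD u false with
      | true =>
        simp only [Bool.not_true, Bool.false_eq_true, if_false, if_true]
        exact ih vis m c
      | false =>
        simp only [Bool.not_false, if_true, Bool.false_eq_true, if_false]
        exact ih _ _ _


-- ── all nodes that A's dfs pushes stay inside [0, n) ──
mutual
theorem dfsA_range (g : List (List Int)) (n : Nat)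
    (hg : ∀ i, i < n → ∀ j ∈ g.getD i [], 0 ≤ j ∧ j.toNat < n)
    (f : Nat) (v : Int) (vis : List Bool) (st : List Int)
    (hv : 0 ≤ v ∧ v.toNat < n) (hst : ∀ x ∈ st, 0 ≤ x ∧ x.toNat < n) :
    ∀ x ∈ (dfsA g f v vis st).2, 0 ≤ x ∧ x.toNat < n := by
  match f with
  | 0 => simpa [dfsA] using hst
  | f + 1 =>
    intro x hx
    simp only [dfsA] at hx
    rcases List.mem_append.mp hx with hx' | hx'
    · exact dfsAList_range g n hg f (g.getD v.toNat []) (vis.set v.toNat true) st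
        (hg v.toNat hv.2) hst x hx'
    · rcases List.mem_singleton.mp hx' with rfl; exact hv
  termination_by (f, 0)
theorem dfsAList_range (g : List (List Int)) (n : Nat)
    (hg : ∀ i, i < n → ∀ j ∈ g.getD i [], 0 ≤ j ∧ j.toNat < n)
    (f : Nat) (ns : List Int) (vis : List Bool) (st : List Int)
    (hns : ∀ i ∈ ns, 0 ≤ i ∧ i.toNat < n) (hst : ∀ x ∈ st, 0 ≤ x ∧ x.toNat < n) :
    ∀ x ∈ (dfsAList g f ns vis st).2, 0 ≤ x ∧ x.toNat < n := by
  match ns with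
  | [] => simpa [dfsAList] using hst
  | i :: rest =>
    simp only [dfsAList]
    cases hvis : vis.getD i.toNat false with
    | true =>
      simpa using dfsAList_range g n hg f rest vis st
        (fun y hy => hns y (List.mem_cons_of_mem _ hy)) hst
    | false =>
      simp only [Bool.false_eq_true, if_false]
      exact dfsAList_range g n hg f rest (dfsA g f i vis st).1 (dfsA g f i vis st).2
        (fun y hy => hns y (List.mem_cons_of_mem _ hy))
        (dfsA_range g n hg f i vis st (hns i List.mem_cons_self) hst)
  termination_by (f, ns.length + 1)
end

theorem toNat_ofNat (u : Nat) : (Int.ofNat u).toNat = u := rfl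

-- ── lock-step simulation of B's kept row entries against A's reverse dfs ──
theorem bloop_sim (costs : List Int) (gr graph : List (List Int)) (n f : Nat)
    (IH : ∀ (v : Int) (vis : List Bool) (m c : Int), 0 ≤ v → v.toNat < n → vis.length = n →
      collectB costs graph n f v vis m c
        = ((dfsA gr f v vis []).1, List.foldl (mcStep costs) (m, c) ((dfsA gr f v vis []).2))) :
    ∀ (ws : List Nat) (vis : List Bool) (m c : Int), (∀ u ∈ ws, u < n) → vis.length = n →
      bloop costs graph n f ws vis m c
        = ((dfsAList gr f (ws.map (fun u => Int.ofNat u)) vis []).1,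
           List.foldl (mcStep costs) (m, c) ((dfsAList gr f (ws.map (fun u => Int.ofNat u)) vis []).2)) := by
  intro ws
  induction ws with
  | nil => intro vis m c _ _; simp [bloop, dfsAList]
  | cons u rest ih =>
    intro vis m c hws hlen
    simp only [bloop, List.map_cons, dfsAList, toNat_ofNat]
    split_ifs with hv
    · exact ih vis m c (fun y hy => hws y (List.mem_cons_of_mem _ hy)) hlen
    · rw [IH (Int.ofNat u) vis m c (by exact Int.natCast_nonneg u)
            (by simpa using hws u List.mem_cons_self) hlen]
      rw [ih (dfsA gr f (Int.ofNat u) vis []).1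
            (List.foldl (mcStep costs) (m, c) ((dfsA gr f (Int.ofNat u) vis []).2)).1
            (List.foldl (mcStep costs) (m, c) ((dfsA gr f (Int.ofNat u) vis []).2)).2
            (fun y hy => hws y (List.mem_cons_of_mem _ hy))
            (by rw [dfsA_len]; exact hlen)]
      rw [dfsAList_acc gr f (List.map (fun u => Int.ofNat u) rest)
            (dfsA gr f (Int.ofNat u) vis []).1 ((dfsA gr f (Int.ofNat u) vis []).2)]
      simp [List.foldl_append]

-- ── node-level simulation: B's collect equals A's reverse dfs plus the fused fold ──
theorem collectB_sim (costs : List Int) (graph : List (List Int)) (n : Nat)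
    (hE : ∀ i, i < n → ∀ j ∈ graph.getD i [], 0 ≤ j ∧ j.toNat < n) :
    ∀ (f : Nat) (v : Int) (vis : List Bool) (m c : Int), 0 ≤ v → v.toNat < n → vis.length = n →
      collectB costs graph n f v vis m c
        = ((dfsA (transposeA graph n) f v vis []).1,
           List.foldl (mcStep costs) (m, c) ((dfsA (transposeA graph n) f v vis []).2)) := by
  intro f
  induction f with
  | zero => intro v vis m c _ _ _; simp [collectB, dfsA]
  | succ f ihf =>
    intro v vis m c hv0 hvn hlen
    have hws : ∀ u ∈ (List.range n).filter (fun u => (graph.getD u []).contains v), u < n :=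
      fun u hu => List.mem_range.mp (List.mem_filter.mp hu).1
    have hrow : ∀ (vis' : List Bool), vis'.length = n →
        dfsAList (transposeA graph n) f ((transposeA graph n).getD v.toNat []) vis' []
          = dfsAList (transposeA graph n) f
              (((List.range n).filter (fun u => (graph.getD u []).contains v)).map
                (fun u => Int.ofNat u)) vis' [] := by
      cases f with
      | zero => intro _ _; rw [dfsAList_zero, dfsAList_zero]
      | succ f' =>
        intro vis' hlen'
        rw [transposeA_getD graph n v.toNat hvn
              (fun i hi j hj => (hE i (List.mem_range.mp hi) j hj).2),
            rowT_eq_rowTv graph v hv0 (List.range n)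
              (fun i hi j hj => (hE i (List.mem_range.mp hi) j hj).1)]
        rw [dfsAList_fo (transposeA graph n) f' (rowTv graph v (List.range n)) [] vis' []
              (by intro x hx; cases hx)
              (by
                intro x hx
                rcases List.mem_flatMap.mp hx with ⟨i, hi, hxi⟩
                rcases List.mem_map.mp hxi with ⟨y, _, rfl⟩
                rw [hlen']
                simpa using List.mem_range.mp hi)]
        rw [fo_rowTv graph v (List.range n) [] List.nodup_range (by intro i _ h; cases h)]
    simp only [collectB, dfsA]
    rw [collectBList_eq_bloop]
    rw [bloop_sim costs (transposeA graph n) graph n f ihf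
          ((List.range n).filter (fun u => (graph.getD u []).contains v))
          (vis.set v.toNat true)
          _ _ hws (by rw [List.length_set]; exact hlen)]
    rw [← hrow (vis.set v.toNat true) (by rw [List.length_set]; exact hlen)]
    have hmc : (if costs.getD v.toNat 0 < m then (costs.getD v.toNat 0, (1 : Int))
        else if costs.getD v.toNat 0 = m then (m, c + 1) else (m, c)) = mcStep costs (m, c) v := rfl
    rw [hmc]
    rw [List.foldl_append]
    simp only [List.foldl_cons, List.foldl_nil]
    rw [← foldMC_step_swap]


-- ── characterizing the fused (min, count) fold against A's two-pass aggregation ──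
def amin (costs : List Int) (l : List Int) (x : Int) : Int :=
  l.foldl (fun a i => min a (costs.getD i.toNat 0)) x

def cnt (costs : List Int) (l : List Int) (m : Int) : Int :=
  l.foldl (fun a i => a + (if costs.getD i.toNat 0 = m then 1 else 0)) 0

theorem cnt_shift (costs : List Int) (m : Int) :
    ∀ (l : List Int) (s : Int),
      l.foldl (fun a i => a + (if costs.getD i.toNat 0 = m then 1 else 0)) s
        = s + l.foldl (fun a i => a + (if costs.getD i.toNat 0 = m then 1 else 0)) 0 := by
  intro l
  induction l with
  | nil => intro s; simp
  | cons i rest ih =>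
    intro s
    simp only [List.foldl_cons]
    rw [ih (s + (if costs.getD i.toNat 0 = m then 1 else 0)),
        ih (0 + (if costs.getD i.toNat 0 = m then 1 else 0))]
    ring

theorem cnt_cons (costs : List Int) (m : Int) (i : Int) (rest : List Int) :
    cnt costs (i :: rest) m = (if costs.getD i.toNat 0 = m then 1 else 0) + cnt costs rest m := by
  simp only [cnt, List.foldl_cons]
  rw [cnt_shift costs m rest (0 + (if costs.getD i.toNat 0 = m then 1 else 0))]
  ring

theorem amin_le_init (costs : List Int) : ∀ (l : List Int) (x : Int), amin costs l x ≤ x := by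
  intro l
  induction l with
  | nil => intro x; simp [amin]
  | cons i rest ih =>
    intro x
    simp only [amin, List.foldl_cons]
    exact le_trans (ih (min x (costs.getD i.toNat 0))) (min_le_left _ _)

theorem amin_cons (costs : List Int) (i : Int) (rest : List Int) (x : Int) :
    amin costs (i :: rest) x = amin costs rest (min x (costs.getD i.toNat 0)) := rfl

theorem mc_char (costs : List Int) :
    ∀ (l : List Int) (m0 c0 : Int),
      List.foldl (mcStep costs) (m0, c0) l
        = (amin costs l m0,
           if amin costs l m0 < m0 then cnt costs l (amin costs l m0) else c0 + cnt costs l m0) := by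
  intro l
  induction l with
  | nil =>
    intro m0 c0
    simp [amin, cnt]
  | cons i rest ih =>
    intro m0 c0
    have hle : amin costs rest (costs.getD i.toNat 0) ≤ costs.getD i.toNat 0 := amin_le_init _ _ _
    simp only [List.foldl_cons]
    by_cases h1 : costs.getD i.toNat 0 < m0
    · rw [show mcStep costs (m0, c0) i = (costs.getD i.toNat 0, 1) by
          simp only [mcStep]; rw [if_pos h1]]
      rw [ih, amin_cons, min_eq_right (le_of_lt h1),
          if_pos (lt_of_le_of_lt hle h1), cnt_cons]
      by_cases h2 : amin costs rest (costs.getD i.toNat 0) < costs.getD i.toNat 0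
      · rw [if_pos h2, if_neg (by omega), zero_add]
      · have heq : amin costs rest (costs.getD i.toNat 0) = costs.getD i.toNat 0 :=
          le_antisymm hle (not_lt.mp h2)
        rw [if_neg h2, heq, if_pos rfl]
    · by_cases h2 : costs.getD i.toNat 0 = m0
      · rw [show mcStep costs (m0, c0) i = (m0, c0 + 1) by
            simp only [mcStep]; rw [if_neg h1, if_pos h2]]
        rw [ih, amin_cons, min_eq_left (not_lt.mp h1)]
        by_cases h3 : amin costs rest m0 < m0
        · rw [if_pos h3, if_pos h3, cnt_cons, if_neg (by omega), zero_add]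
        · rw [if_neg h3, if_neg h3, cnt_cons, if_pos h2]
          simp only [Prod.mk.injEq]
          exact ⟨trivial, by ring⟩
      · rw [show mcStep costs (m0, c0) i = (m0, c0) by
            simp only [mcStep]; rw [if_neg h1, if_neg h2]]
        rw [ih, amin_cons, min_eq_left (not_lt.mp h1)]
        by_cases h3 : amin costs rest m0 < m0
        · rw [if_pos h3, if_pos h3, cnt_cons, if_neg (by omega), zero_add]
        · rw [if_neg h3, if_neg h3, cnt_cons, if_neg (by omega), zero_add]

theorem foldl_min_absorb : ∀ (l : List Int) (x y : Int),
    l.foldl min (min x y) = min x (l.foldl min y) := by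
  intro l
  induction l with
  | nil => intro x y; simp
  | cons z t ih =>
    intro x y
    simp only [List.foldl_cons]
    rw [min_assoc, ih]

theorem foldl_min_le_init : ∀ (l : List Int) (a : Int), l.foldl min a ≤ a := by
  intro l
  induction l with
  | nil => intro a; simp
  | cons z t ih =>
    intro a
    simp only [List.foldl_cons]
    exact le_trans (ih (min a z)) (min_le_left _ _)

theorem minListA_le_mem : ∀ (ys : List Int) (x : Int), x ∈ ys → minListA ys ≤ x := by
  intro ys
  match ys with
  | [] => intro x hx; cases hx
  | y0 :: yt =>
    intro x hx
    rcases List.mem_cons.mp hx with rfl | hx'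
    · exact foldl_min_le_init yt x
    · clear hx
      induction yt generalizing y0 with
      | nil => cases hx'
      | cons z t ih =>
        rcases List.mem_cons.mp hx' with rfl | hx''
        · simp only [minListA, List.foldl_cons]
          exact le_trans (foldl_min_le_init t (min y0 x)) (min_le_right _ _)
        · simp only [minListA, List.foldl_cons]
          exact ih (min y0 z) hx''

theorem amin_eq_minListA (costs : List Int) (l : List Int) (v : Int) (hv : v ∈ l) :
    amin costs l (costs.getD v.toNat 0) = minListA (l.map (fun i => costs.getD i.toNat 0)) := by
  have hmap : costs.getD v.toNat 0 ∈ l.map (fun i => costs.getD i.toNat 0) :=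
    List.mem_map.mpr ⟨v, hv, rfl⟩
  have hamin : amin costs l (costs.getD v.toNat 0)
      = (l.map (fun i => costs.getD i.toNat 0)).foldl min (costs.getD v.toNat 0) := by
    rw [amin, List.foldl_map]
  rw [hamin]
  rcases hmap' : l.map (fun i => costs.getD i.toNat 0) with _ | ⟨y0, yt⟩
  · rw [hmap'] at hmap; cases hmap
  · rw [hmap'] at hmap
    rw [hmap']
    simp only [List.foldl_cons, minListA]
    rw [foldl_min_absorb]
    exact min_eq_right (minListA_le_mem (y0 :: yt) _ hmap)

-- per-SCC: the fused accumulator started at (cost v, 0) computes A's (min, count)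
theorem scc_agg (costs : List Int) (scc : List Int) (v : Int) (hv : v ∈ scc) :
    List.foldl (mcStep costs) (costs.getD v.toNat 0, 0) scc
      = (minListA (scc.map (fun i => costs.getD i.toNat 0)),
         cnt costs scc (minListA (scc.map (fun i => costs.getD i.toNat 0)))) := by
  rw [mc_char, amin_eq_minListA costs scc v hv]
  by_cases h : minListA (scc.map (fun i => costs.getD i.toNat 0)) < costs.getD v.toNat 0
  · rw [if_pos h]
  · rw [if_neg h, zero_add]
    have hle : minListA (scc.map (fun i => costs.getD i.toNat 0)) ≤ costs.getD v.toNat 0 :=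
      minListA_le_mem _ _ (List.mem_map.mpr ⟨v, hv, rfl⟩)
    rw [le_antisymm hle (not_lt.mp h)]


-- ── phase-2 collector: accumulator lemma for the list of SCCs ──
theorem aphase_acc (gr : List (List Int)) (n : Nat) :
    ∀ (l : List Int) (vis : List Bool) (sccs : List (List Int)),
      l.foldl (fun (p : List Bool × List (List Int)) i =>
          if p.1.getD i.toNat false then p
          else ((dfsA gr (n + 1) i p.1 []).1, p.2 ++ [(dfsA gr (n + 1) i p.1 []).2])) (vis, sccs)
        = ((l.foldl (fun (p : List Bool × List (List Int)) i =>
              if p.1.getD i.toNat false then p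
              else ((dfsA gr (n + 1) i p.1 []).1, p.2 ++ [(dfsA gr (n + 1) i p.1 []).2])) (vis, [])).1,
           sccs ++ (l.foldl (fun (p : List Bool × List (List Int)) i =>
              if p.1.getD i.toNat false then p
              else ((dfsA gr (n + 1) i p.1 []).1, p.2 ++ [(dfsA gr (n + 1) i p.1 []).2])) (vis, [])).2) := by
  intro l
  induction l with
  | nil => intro vis sccs; simp
  | cons i rest ih =>
    intro vis sccs
    simp only [List.foldl_cons]
    split_ifs with hv
    · exact ih vis sccs
    · rw [ih (dfsA gr (n + 1) i vis []).1 (sccs ++ [(dfsA gr (n + 1) i vis []).2]),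
          ih (dfsA gr (n + 1) i vis []).1 ([] ++ [(dfsA gr (n + 1) i vis []).2])]
      simp [List.append_assoc]

-- ── every node of the first pass's order stack lies in [0, n) ──
theorem foldOrder_range (g : List (List Int)) (n : Nat)
    (hg : ∀ i, i < n → ∀ j ∈ g.getD i [], 0 ≤ j ∧ j.toNat < n) :
    ∀ (L : List Nat) (p : List Bool × List Int), (∀ i ∈ L, i < n) →
      (∀ x ∈ p.2, 0 ≤ x ∧ x.toNat < n) →
      ∀ x ∈ (L.foldl (fun p i =>
          if p.1.getD i false then p else dfsA g (n + 1) (Int.ofNat i) p.1 p.2) p).2,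
        0 ≤ x ∧ x.toNat < n := by
  intro L
  induction L with
  | nil => intro p _ hp; simpa using hp
  | cons i rest ih =>
    intro p hL hp
    simp only [List.foldl_cons]
    split_ifs with hv
    · exact ih p (fun y hy => hL y (List.mem_cons_of_mem _ hy)) hp
    · exact ih (dfsA g (n + 1) (Int.ofNat i) p.1 p.2)
        (fun y hy => hL y (List.mem_cons_of_mem _ hy))
        (dfsA_range g n hg (n + 1) (Int.ofNat i) p.1 p.2
          ⟨Int.natCast_nonneg i, by simpa [toNat_ofNat] using hL i List.mem_cons_self⟩ hp)

-- ── the fused reverse pass equals A's collect-then-aggregate ──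
theorem fuse (costs : List Int) (graph : List (List Int)) (n : Nat)
    (hE : ∀ i, i < n → ∀ j ∈ graph.getD i [], 0 ≤ j ∧ j.toNat < n) :
    ∀ (l : List Int) (vis : List Bool) (T W : Int),
      (∀ x ∈ l, 0 ≤ x ∧ x.toNat < n) → vis.length = n →
      l.foldl (fun (p : List Bool × Int × Int) v =>
          if p.1.getD v.toNat false then p
          else ((collectB costs graph n (n + 1) v p.1 (costs.getD v.toNat 0) 0).1,
                p.2.1 + (collectB costs graph n (n + 1) v p.1 (costs.getD v.toNat 0) 0).2.1,
                PySem.Int.mod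
                  (p.2.2 * (collectB costs graph n (n + 1) v p.1 (costs.getD v.toNat 0) 0).2.2)
                  1000000007)) (vis, T, W)
      = ((l.foldl (fun (p : List Bool × List (List Int)) i =>
            if p.1.getD i.toNat false then p
            else ((dfsA (transposeA graph n) (n + 1) i p.1 []).1,
                  p.2 ++ [(dfsA (transposeA graph n) (n + 1) i p.1 []).2])) (vis, [])).1,
         ((l.foldl (fun (p : List Bool × List (List Int)) i =>
            if p.1.getD i.toNat false then p
            else ((dfsA (transposeA graph n) (n + 1) i p.1 []).1,
                  p.2 ++ [(dfsA (transposeA graph n) (n + 1) i p.1 []).2])) (vis, [])).2).foldl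
           (fun (p : Int × Int) scc =>
             (p.1 + minListA (scc.map (fun i => costs.getD i.toNat 0)),
              PySem.Int.mod (p.2 * scc.foldl (fun a i => a +
                  (if costs.getD i.toNat 0 = minListA (scc.map (fun i => costs.getD i.toNat 0))
                   then 1 else 0)) (0 : Int)) 1000000007)) (T, W)) := by
  intro l
  induction l with
  | nil => intro vis T W _ _; simp
  | cons v rest ih =>
    intro vis T W hl hlen
    have hv0 : 0 ≤ v := (hl v List.mem_cons_self).1
    have hvn : v.toNat < n := (hl v List.mem_cons_self).2
    simp only [List.foldl_cons]
    split_ifs with hv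
    · exact ih vis T W (fun y hy => hl y (List.mem_cons_of_mem _ hy)) hlen
    · rw [collectB_sim costs graph n hE (n + 1) v vis (costs.getD v.toNat 0) 0 hv0 hvn hlen]
      have hvmem : v ∈ (dfsA (transposeA graph n) (n + 1) v vis []).2 := by
        simp only [dfsA]
        exact List.mem_append.mpr (Or.inr List.mem_cons_self)
      rw [scc_agg costs _ v hvmem]
      rw [ih (dfsA (transposeA graph n) (n + 1) v vis []).1
            (T + minListA (((dfsA (transposeA graph n) (n + 1) v vis []).2).map
              (fun i => costs.getD i.toNat 0)))
            (PySem.Int.mod (W * cnt costs ((dfsA (transposeA graph n) (n + 1) v vis []).2)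
              (minListA (((dfsA (transposeA graph n) (n + 1) v vis []).2).map
                (fun i => costs.getD i.toNat 0)))) 1000000007)
            (fun y hy => hl y (List.mem_cons_of_mem _ hy))
            (by rw [dfsA_len]; exact hlen)]
      simp only [List.nil_append]
      rw [aphase_acc (transposeA graph n) n rest
            (dfsA (transposeA graph n) (n + 1) v vis []).1
            [(dfsA (transposeA graph n) (n + 1) v vis []).2]]
      simp only [List.singleton_append, List.foldl_cons]
      rfl

-- ===== VERDICT (by name: the statement is the Claim_ definition above) =====
theorem solve_spec : Claim_equal_solve := by
  intro n costs graph _ hpre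
  unfold Spec_solve
  obtain ⟨hg, -, hrows⟩ := hpre
  have hE : ∀ i, i < n.toNat → ∀ j ∈ graph.getD i [], 0 ≤ j ∧ j.toNat < n.toNat := by
    intro i hi j hj
    have hil : i < graph.length := lt_of_lt_of_le hi hg
    have hgetD : graph.getD i [] = graph[i] := by
      simp [List.getD_eq_getElem?_getD, List.getElem?_eq_getElem hil]
    have hlt : i < (graph.take n.toNat).length := by
      simp only [List.length_take]
      omega
    have hmem : graph[i] ∈ graph.take n.toNat := by
      have htake : (graph.take n.toNat)[i]'hlt = graph[i] := List.getElem_take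
      exact htake ▸ List.getElem_mem hlt
    have hj' := hrows graph[i] hmem j (by rwa [hgetD] at hj)
    exact ⟨hj'.1, by omega⟩
  have hfb : finishB = dfsA := by
    funext g f v vis st
    exact finishB_eq g f v vis st
  have hrange : ∀ x ∈ (fillOrderA graph n.toNat).2.reverse, 0 ≤ x ∧ x.toNat < n.toNat := by
    intro x hx
    exact foldOrder_range graph n.toNat hE (List.range n.toNat)
      (List.replicate n.toNat false, []) (fun i hi => List.mem_range.mp hi)
      (by intro y hy; cases hy) x (List.mem_reverse.mp hx)
  have key := fuse costs graph n.toNat hE ((fillOrderA graph n.toNat).2.reverse)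
      (List.replicate n.toNat false) 0 1 hrange List.length_replicate
  calc solve n costs graph
      = (((fillOrderA graph n.toNat).2.reverse.foldl
            (fun (p : List Bool × List (List Int)) i =>
              if p.1.getD i.toNat false then p
              else ((dfsA (transposeA graph n.toNat) (n.toNat + 1) i p.1 []).1,
                    p.2 ++ [(dfsA (transposeA graph n.toNat) (n.toNat + 1) i p.1 []).2]))
            (List.replicate n.toNat false, [])).2).foldl
          (fun (p : Int × Int) scc =>
            (p.1 + minListA (scc.map (fun i => costs.getD i.toNat 0)),
             PySem.Int.mod (p.2 * scc.foldl (fun a i => a +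
                 (if costs.getD i.toNat 0 = minListA (scc.map (fun i => costs.getD i.toNat 0))
                  then 1 else 0)) (0 : Int)) 1000000007)) (0, 1) := rfl
    _ = ((fillOrderA graph n.toNat).2.reverse.foldl
          (fun (p : List Bool × Int × Int) v =>
            if p.1.getD v.toNat false then p
            else ((collectB costs graph n.toNat (n.toNat + 1) v p.1 (costs.getD v.toNat 0) 0).1,
                  p.2.1 + (collectB costs graph n.toNat (n.toNat + 1) v p.1 (costs.getD v.toNat 0) 0).2.1,
                  PySem.Int.mod
                    (p.2.2 * (collectB costs graph n.toNat (n.toNat + 1) v p.1 (costs.getD v.toNat 0) 0).2.2)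
                    1000000007))
          (List.replicate n.toNat false, 0, 1)).2 := by rw [key]
    _ = solve_alt n costs graph := by
          simp only [solve_alt]
          rw [hfb]
          rfl
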